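-- pv_equiv track=rewrite | github.com/RascalTwo/DailyProblem | problems/Arbitrary/014/solve.py | solve
-- ===== SOURCE A (Python) =====
-- import collections
-- from typing import DefaultDict, List
--
-- def count_common(a: int, b: int) -> int:
-- 	length = max(a.bit_length(), b.bit_length())
--
-- 	return sum(((a >> i) & 1) == ((b >> i) & 1) for i in range(length))
--
-- def solve(integers: List[int]) -> List[int]:
-- 	totals: DefaultDict[int, int] = collections.defaultdict(int)
-- 	for i, a in enumerate(integers):
-- 		for j, b in enumerate(integers):
-- 			if i == j:
-- 				continue
-- 			totals[i] += count_common(a, b)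
-- 	return [value for _, value in sorted(enumerate(integers), key = lambda pair: totals[pair[0]], reverse=True)]
-- ===== SOURCE B (Python) =====
-- def solve(integers):
--     n = len(integers)
--     lengths = [x.bit_length() for x in integers]
--     width = max(lengths, default=0)
--     ones = [sum((x >> p) & 1 for x in integers) for p in range(width)]
--     long_ones = [sum((x >> p) & 1 for x, l in zip(integers, lengths) if l > p) for p in range(width)]
--     long_cnt = [sum(1 for l in lengths if l > p) for p in range(width)]
--     totals = [
--         sum(
--             ((ones[p] if (x >> p) & 1 else n - ones[p]) - 1)
--             if p < l
--             else (long_ones[p] if (x >> p) & 1 else long_cnt[p] - long_ones[p])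
--             for p in range(width)
--         )
--         for x, l in zip(integers, lengths)
--     ]
--     return [x for _, x in sorted(enumerate(integers), key=lambda pair: totals[pair[0]], reverse=True)]
-- ===== Notes on version B (the rewrite author's own statement) =====
-- stated objective: faster
-- what changed: Replaces the all-pairs O(n^2*bits) matching-bit accumulation with per-bit-position counting (ones per bit, ones/count among numbers whose bit_length exceeds the position), from which each element's total is reconstructed in O(bits), then the same stable descending sort.
import Mathlib
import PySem

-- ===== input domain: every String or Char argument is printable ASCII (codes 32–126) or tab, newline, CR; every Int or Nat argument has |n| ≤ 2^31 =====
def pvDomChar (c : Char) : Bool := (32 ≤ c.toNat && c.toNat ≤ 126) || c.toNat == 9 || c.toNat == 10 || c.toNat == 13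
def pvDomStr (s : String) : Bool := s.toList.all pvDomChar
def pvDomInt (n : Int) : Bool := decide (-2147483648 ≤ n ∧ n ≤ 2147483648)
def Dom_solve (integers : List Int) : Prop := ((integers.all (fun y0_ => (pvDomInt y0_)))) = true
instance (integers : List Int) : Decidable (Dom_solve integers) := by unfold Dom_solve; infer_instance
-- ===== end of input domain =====

-- B replaces A's all-pairs O(n^2*bits) accumulation by per-bit-position counting, O(n*bits + n log n).

-- ===== PORT A =====
def count_common (a : Int) (b : Int) : Int :=
  let length : Int := ((max (PySem.Int.bitLength a) (PySem.Int.bitLength b) : Nat) : Int)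
  List.foldl
    (fun acc i =>
      acc + (if PySem.Int.band (a >>> i.toNat) 1 = PySem.Int.band (b >>> i.toNat) 1 then 1 else 0))
    0 (PySem.List.pyRange 0 length 1)

def solve (integers : List Int) : List Int :=
  let totals : PySem.Dict Int Int :=
    List.foldl
      (fun d p =>
        List.foldl
          (fun d q =>
            if p.1 = q.1 then d
            else PySem.Dict.modify d p.1 0 (fun v => v + count_common p.2 q.2))
          d (PySem.List.enumerate integers))
      PySem.Dict.empty (PySem.List.enumerate integers)
  List.map (fun p => p.2)
    (PySem.List.sorted (PySem.List.enumerate integers) (fun pair => PySem.Dict.getD totals pair.1 0) true)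

-- ===== PORT B =====
def solve_alt (integers : List Int) : List Int :=
  let n : Int := PySem.List.len integers
  let lengths : List Int := integers.map (fun x => ((PySem.Int.bitLength x : Nat) : Int))
  let width : Int := PySem.List.maxD lengths (fun l => l) 0
  let ones : List Int := (PySem.List.pyRange 0 width 1).map (fun p =>
    List.foldl (fun acc x => acc + PySem.Int.band (x >>> p.toNat) 1) 0 integers)
  let longOnes : List Int := (PySem.List.pyRange 0 width 1).map (fun p =>
    List.foldl (fun acc (xl : Int × Int) => if xl.2 > p then acc + PySem.Int.band (xl.1 >>> p.toNat) 1 else acc)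
      0 (integers.zip lengths))
  let longCnt : List Int := (PySem.List.pyRange 0 width 1).map (fun p =>
    List.foldl (fun acc l => if l > p then acc + 1 else acc) 0 lengths)
  let totals : List Int := (integers.zip lengths).map (fun (xl : Int × Int) =>
    List.foldl
      (fun acc p =>
        acc +
          (if p < xl.2 then
            (if PySem.Int.band (xl.1 >>> p.toNat) 1 ≠ 0 then PySem.List.pyGetD ones p 0
             else n - PySem.List.pyGetD ones p 0) - 1
           else
            (if PySem.Int.band (xl.1 >>> p.toNat) 1 ≠ 0 then PySem.List.pyGetD longOnes p 0
             else PySem.List.pyGetD longCnt p 0 - PySem.List.pyGetD longOnes p 0)))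
      0 (PySem.List.pyRange 0 width 1))
  List.map (fun p => p.2)
    (PySem.List.sorted (PySem.List.enumerate integers) (fun pair => PySem.List.pyGetD totals pair.1 0) true)

-- ===== PRECONDITION & SPEC =====
def Spec_solve (integers : List Int) (out : List Int) : Prop := out = solve_alt integers
instance (integers : List Int) (out : List Int) : Decidable (Spec_solve integers out) := by unfold Spec_solve; infer_instance

-- ===== CLAIM (what is proved, stated in full; the proofs are below) =====
def Claim_equal_solve : Prop := ∀ (integers : List Int), Dom_solve integers → Spec_solve integers (solve integers)

-- ===== LEMMAS AND PROOFS =====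

-- bit p of x, Python (x >> p) & 1
def pvBit (x : Int) (p : Nat) : Int := PySem.Int.band (x >>> p) 1

theorem pvBit_cases (x : Int) (p : Nat) : pvBit x p = 0 ∨ pvBit x p = 1 := by
  unfold pvBit
  rw [PySem.Int.band_one]
  exact PySem.Int.mod_two_eq _

-- insertion with key-congruent comparison functions agrees
theorem insertBy_congr {α : Type} (b1 b2 : α → α → Bool) (x : α) (ys : List α)
    (h : ∀ y ∈ ys, b1 x y = b2 x y) :
    PySem.List.insertBy b1 x ys = PySem.List.insertBy b2 x ys := by
  induction ys with
  | nil => rfl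
  | cons y t ih =>
    simp only [PySem.List.insertBy]
    rw [h y (List.mem_cons_self)]
    by_cases hb : b2 x y = true
    · rw [if_pos hb, if_pos hb]
    · rw [if_neg hb, if_neg hb, ih (fun y hy => h y (List.mem_cons_of_mem _ hy))]

-- a stable reverse sort only looks at the keys of list members
theorem sorted_rev_congr {α κ : Type} [LinearOrder κ] (xs : List α) (k1 k2 : α → κ)
    (h : ∀ x ∈ xs, k1 x = k2 x) :
    PySem.List.sorted xs k1 true = PySem.List.sorted xs k2 true := by
  rw [PySem.List.sorted_rev_eq_foldl_insertBy, PySem.List.sorted_rev_eq_foldl_insertBy]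
  have main : ∀ (l : List α) (acc : List α),
      (∀ x ∈ l, k1 x = k2 x) → (∀ x ∈ acc, k1 x = k2 x) →
      List.foldl (fun acc x => PySem.List.insertBy (fun a b => decide (k1 b < k1 a)) x acc) acc l
        = List.foldl (fun acc x => PySem.List.insertBy (fun a b => decide (k2 b < k2 a)) x acc) acc l := by
    intro l
    induction l with
    | nil => intro acc _ _; rfl
    | cons x t ih =>
      intro acc hl hacc
      simp only [List.foldl_cons]
      have hins : PySem.List.insertBy (fun a b => decide (k1 b < k1 a)) x acc
          = PySem.List.insertBy (fun a b => decide (k2 b < k2 a)) x acc := by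
        apply insertBy_congr
        intro y hy
        rw [hl x List.mem_cons_self, hacc y hy]
      rw [hins]
      apply ih
      · intro z hz; exact hl z (List.mem_cons_of_mem _ hz)
      · intro z hz
        rcases (PySem.List.mem_insertBy _ _ _ _).1 hz with rfl | hz'
        · exact hl z List.mem_cons_self
        · exact hacc z hz'
  exact main xs [] h (by simp)

-- List.range sum bridge
theorem sum_list_range (n : Nat) (f : Nat → Int) :
    ((List.range n).map f).sum = ∑ k ∈ Finset.range n, f k := by
  induction n with
  | zero => simp
  | succ m ih => rw [List.range_succ, Finset.sum_range_succ, List.map_append]; simp [ih]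

-- fold-with-if as a sum
theorem foldl_add_ite {α : Type} (l : List α) (p : α → Prop) [DecidablePred p]
    (g : α → Int) (c : Int) :
    List.foldl (fun acc x => if p x then acc + g x else acc) c l
      = c + (l.map (fun x => if p x then g x else 0)).sum := by
  induction l generalizing c with
  | nil => simp
  | cons x t ih =>
    simp only [List.foldl_cons, List.map_cons, List.sum_cons]
    by_cases hp : p x
    · rw [if_pos hp, if_pos hp, ih]; ring
    · rw [if_neg hp, if_neg hp, ih]; ring

-- a list sum as a Finset.range sum through pyGetD
theorem map_sum_eq_range_sum (xs : List Int) (f : Int → Int) :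
    (xs.map f).sum = ∑ j ∈ Finset.range xs.length, f (PySem.List.pyGetD xs (j : Int) 0) := by
  rw [← sum_list_range]
  have hmap : xs.map f = (List.range xs.length).map (fun (j : Nat) => f (PySem.List.pyGetD xs (j : Int) 0)) := by
    apply List.ext_getElem (by simp)
    intro i h1 h2
    simp only [List.getElem_map, List.getElem_range]
    rw [PySem.List.pyGetD_eq_getElem xs 0 (Int.natCast_nonneg i) (by exact_mod_cast (by simpa using h1))]
    simp
  rw [hmap]

-- inner dict loop: only key i is touched, accumulating the filtered sum
theorem inner_getD (l : List (Int × Int)) (d : PySem.Dict Int Int) (i a j : Int) :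
    (List.foldl
        (fun d q =>
          if i = q.1 then d else PySem.Dict.modify d i 0 (fun v => v + count_common a q.2))
        d l).getD j 0
      = d.getD j 0 +
        (if j = i then
          ((l.filter (fun q => decide ¬(i = q.1))).map (fun q => count_common a q.2)).sum
         else 0) := by
  induction l generalizing d with
  | nil => simp
  | cons q t ih =>
    simp only [List.foldl_cons, List.filter_cons]
    by_cases hiq : i = q.1
    · rw [if_pos hiq, ih]
      simp [hiq]
    · rw [if_neg hiq, ih, PySem.Dict.getD_modify]
      by_cases hji : j = i
      · rw [if_pos hji]
        simp [hiq, hji, add_assoc]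
      · simp only [if_neg hji]

-- outer dict loop
theorem outer_getD (l' l : List (Int × Int)) (d0 : PySem.Dict Int Int) (j : Int) :
    (List.foldl
        (fun d p =>
          List.foldl
            (fun d q =>
              if p.1 = q.1 then d else PySem.Dict.modify d p.1 0 (fun v => v + count_common p.2 q.2))
            d l)
        d0 l').getD j 0
      = d0.getD j 0 +
        ((l'.filter (fun p => decide (j = p.1))).map
          (fun p =>
            ((l.filter (fun q => decide ¬(p.1 = q.1))).map (fun q => count_common p.2 q.2)).sum)).sum := by
  induction l' generalizing d0 with
  | nil => simp
  | cons p t ih =>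
    simp only [List.foldl_cons, List.filter_cons]
    rw [ih, inner_getD l d0 p.1 p.2 j]
    by_cases hjp : j = p.1
    · simp [hjp]
      ring
    · simp [hjp]

-- every index in enumerate xs s is ≥ s
theorem enumerate_fst_ge {α : Type} (xs : List α) (s : Int) (p : Int × α)
    (hp : p ∈ PySem.List.enumerate xs s) : s ≤ p.1 := by
  rcases (PySem.List.mem_enumerate_iff _ _ _).1 hp with ⟨k, hk, rfl⟩
  simp

theorem filter_enumerate_aux {α : Type} (xs : List α) (s : Int) (k : Nat) (hk : k < xs.length) :
    (PySem.List.enumerate xs s).filter (fun p => decide (s + (k : Int) = p.1))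
      = [(s + (k : Int), xs[k])] := by
  induction xs generalizing s k with
  | nil => simp at hk
  | cons x t ih =>
    rw [PySem.List.enumerate_cons]
    cases k with
    | zero =>
      have h0 : s + ((0 : Nat) : Int) = s := by simp
      rw [h0, List.filter_cons]
      have hnil : (PySem.List.enumerate t (s + 1)).filter (fun p => decide (s = p.1)) = [] := by
        apply List.filter_eq_nil_iff.2
        intro p hp
        have := enumerate_fst_ge t (s + 1) p hp
        simp only [decide_eq_true_eq]
        intro h; omega
      simp [hnil]
    | succ m =>
      simp only [List.filter_cons, decide_eq_true_eq]
      rw [if_neg (by push_cast; omega)]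
      have hm : m < t.length := by simpa using hk
      have := ih (s + 1) m hm
      have harr : s + ((m + 1 : Nat) : Int) = (s + 1) + (m : Int) := by push_cast; ring
      rw [harr]
      rw [this]
      simp

theorem filter_enumerate {α : Type} (xs : List α) (k : Nat) (hk : k < xs.length) :
    (PySem.List.enumerate xs).filter (fun p => decide ((k : Int) = p.1))
      = [((k : Int), xs[k])] := by
  have := filter_enumerate_aux xs 0 k hk
  simpa using this

-- proof-side abbreviations for B's internals (definitionally equal to the let-expanded port)
def pvA (xs : List Int) (k : Nat) : Int := PySem.List.pyGetD xs (k : Int) 0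

def pvLen (x : Int) : Nat := PySem.Int.bitLength x

def pvOnes (xs : List Int) (p : Nat) : Int :=
  ∑ j ∈ Finset.range xs.length, pvBit (pvA xs j) p

def pvLOnes (xs : List Int) (p : Nat) : Int :=
  ∑ j ∈ Finset.range xs.length,
    (if (p : Int) < ((pvLen (pvA xs j) : Nat) : Int) then pvBit (pvA xs j) p else 0)

def pvLCnt (xs : List Int) (p : Nat) : Int :=
  ∑ j ∈ Finset.range xs.length,
    (if (p : Int) < ((pvLen (pvA xs j) : Nat) : Int) then (1 : Int) else 0)

def pvE (xs : List Int) (k : Nat) (p : Nat) : Int :=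
  if (p : Int) < ((pvLen (pvA xs k) : Nat) : Int) then
    (if pvBit (pvA xs k) p ≠ 0 then pvOnes xs p else (xs.length : Int) - pvOnes xs p) - 1
  else
    (if pvBit (pvA xs k) p ≠ 0 then pvLOnes xs p else pvLCnt xs p - pvLOnes xs p)

def pvLengthsL (xs : List Int) : List Int :=
  xs.map (fun x => ((PySem.Int.bitLength x : Nat) : Int))

def pvWidthI (xs : List Int) : Int := PySem.List.maxD (pvLengthsL xs) (fun l => l) 0

def pvW (xs : List Int) : Nat := (pvWidthI xs).toNat

def pvOnesL (xs : List Int) : List Int :=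
  (PySem.List.pyRange 0 (pvWidthI xs) 1).map (fun p =>
    List.foldl (fun acc x => acc + PySem.Int.band (x >>> p.toNat) 1) 0 xs)

def pvLOnesL (xs : List Int) : List Int :=
  (PySem.List.pyRange 0 (pvWidthI xs) 1).map (fun p =>
    List.foldl (fun acc (xl : Int × Int) => if xl.2 > p then acc + PySem.Int.band (xl.1 >>> p.toNat) 1 else acc)
      0 (xs.zip (pvLengthsL xs)))

def pvLCntL (xs : List Int) : List Int :=
  (PySem.List.pyRange 0 (pvWidthI xs) 1).map (fun p =>
    List.foldl (fun acc l => if l > p then acc + 1 else acc) 0 (pvLengthsL xs))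

def pvTotalsB (xs : List Int) : List Int :=
  (xs.zip (pvLengthsL xs)).map (fun (xl : Int × Int) =>
    List.foldl
      (fun acc p =>
        acc +
          (if p < xl.2 then
            (if PySem.Int.band (xl.1 >>> p.toNat) 1 ≠ 0 then PySem.List.pyGetD (pvOnesL xs) p 0
             else PySem.List.len xs - PySem.List.pyGetD (pvOnesL xs) p 0) - 1
           else
            (if PySem.Int.band (xl.1 >>> p.toNat) 1 ≠ 0 then PySem.List.pyGetD (pvLOnesL xs) p 0
             else PySem.List.pyGetD (pvLCntL xs) p 0 - PySem.List.pyGetD (pvLOnesL xs) p 0)))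
      0 (PySem.List.pyRange 0 (pvWidthI xs) 1))

def pvDictA (xs : List Int) : PySem.Dict Int Int :=
  List.foldl
    (fun d p =>
      List.foldl
        (fun d q =>
          if p.1 = q.1 then d
          else PySem.Dict.modify d p.1 0 (fun v => v + count_common p.2 q.2))
        d (PySem.List.enumerate xs))
    PySem.Dict.empty (PySem.List.enumerate xs)

theorem pvA_eq (xs : List Int) (k : Nat) (hk : k < xs.length) : pvA xs k = xs[k] := by
  unfold pvA
  rw [PySem.List.pyGetD_eq_getElem xs 0 (Int.natCast_nonneg k) (by exact_mod_cast hk)]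
  simp

-- count_common as a Finset sum of bit-equality indicators
theorem count_common_eq_sum (a b : Int) :
    count_common a b
      = ∑ p ∈ Finset.range (max (PySem.Int.bitLength a) (PySem.Int.bitLength b)),
          (if pvBit a p = pvBit b p then (1 : Int) else 0) := by
  unfold count_common
  show List.foldl
      (fun acc i =>
        acc + (if PySem.Int.band (a >>> i.toNat) 1 = PySem.Int.band (b >>> i.toNat) 1 then 1 else 0))
      0 (PySem.List.pyRange 0 ((max (PySem.Int.bitLength a) (PySem.Int.bitLength b) : Nat) : Int) 1) = _
  rw [PySem.List.pyRange_one, PySem.List.foldl_add, List.map_map, ← sum_list_range]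
  have hT : (((max (PySem.Int.bitLength a) (PySem.Int.bitLength b) : Nat) : Int) - 0).toNat
      = max (PySem.Int.bitLength a) (PySem.Int.bitLength b) := by omega
  rw [hT, zero_add]
  apply congrArg List.sum
  apply List.map_congr_left
  intro p _
  simp only [Function.comp_apply, zero_add, Int.toNat_natCast]
  simp only [pvBit]
  simp only [Int.shiftRight_natCast_right]
  exact ite_congr rfl (fun _ => rfl) (fun _ => rfl)

-- sum of a filtered-mapped list as a sum over the unfiltered list
theorem sum_map_filter {α : Type} (l : List α) (p : α → Bool) (f : α → Int) :
    ((l.filter p).map f).sum = (l.map (fun x => if p x then f x else 0)).sum := by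
  induction l with
  | nil => rfl
  | cons x t ih => by_cases hp : p x <;> simp [hp, ih]

-- enumerate-filter-map sum as a range sum
theorem sum_filter_enum (xs : List Int) (i : Int) (f : Int × Int → Int) :
    (((PySem.List.enumerate xs).filter (fun q => decide ¬(i = q.1))).map f).sum
      = ∑ j ∈ Finset.range xs.length,
          (if i = (j : Int) then 0 else f ((j : Int), PySem.List.pyGetD xs (j : Int) 0)) := by
  rw [PySem.List.enumerate_eq_map_pyRange xs 0, List.filter_map, List.map_map, sum_map_filter,
    PySem.List.len_eq, PySem.List.pyRange_one, List.map_map, ← sum_list_range]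
  have hT : (((xs.length : Nat) : Int) - 0).toNat = xs.length := by simp
  rw [hT]
  apply congrArg List.sum
  apply List.map_congr_left
  intro j _
  simp only [Function.comp_apply, zero_add]
  by_cases h : i = (j : Int)
  · simp [h]
  · simp [h]

-- extend a range sum with zero padding
theorem sum_range_extend (M Wn : Nat) (h : M ≤ Wn) (g : Nat → Int) :
    ∑ p ∈ Finset.range M, g p = ∑ p ∈ Finset.range Wn, (if p < M then g p else 0) := by
  have hsub : Finset.range M ⊆ Finset.range Wn := by
    intro x hx; simp only [Finset.mem_range] at hx ⊢; omega
  rw [← Finset.sum_subset hsub (fun x _ hnx => by rw [if_neg (by simpa using hnx)])]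
  apply Finset.sum_congr rfl
  intro p hp
  rw [if_pos (Finset.mem_range.1 hp)]

-- the core per-bit counting identity
theorem core_identity (xs : List Int) (k : Nat) (hk : k < xs.length) (W : Nat)
    (hW : ∀ j ∈ Finset.range xs.length, pvLen (pvA xs j) ≤ W) :
    (∑ j ∈ Finset.range xs.length,
        (if (k : Int) = (j : Int) then 0
         else
          ∑ p ∈ Finset.range (max (pvLen (pvA xs k)) (pvLen (pvA xs j))),
            (if pvBit (pvA xs k) p = pvBit (pvA xs j) p then (1 : Int) else 0)))
      = ∑ p ∈ Finset.range W, pvE xs k p := by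
  have hkW : pvLen (pvA xs k) ≤ W := hW k (Finset.mem_range.2 hk)
  have hcast : ∀ (q m : Nat), ((q : Int) < ((m : Nat) : Int)) ↔ q < m := by
    intro q m; exact_mod_cast Iff.rfl
  have h1 : ∀ j ∈ Finset.range xs.length,
      (if (k : Int) = (j : Int) then 0
       else
        ∑ p ∈ Finset.range (max (pvLen (pvA xs k)) (pvLen (pvA xs j))),
          (if pvBit (pvA xs k) p = pvBit (pvA xs j) p then (1 : Int) else 0))
      = ∑ p ∈ Finset.range W,
          (if (k : Int) = (j : Int) then 0
           else if p < max (pvLen (pvA xs k)) (pvLen (pvA xs j)) then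
             (if pvBit (pvA xs k) p = pvBit (pvA xs j) p then (1 : Int) else 0) else 0) := by
    intro j hj
    by_cases h : (k : Int) = (j : Int)
    · simp [h]
    · rw [if_neg h, sum_range_extend _ W (max_le hkW (hW j hj))]
      exact Finset.sum_congr rfl (fun p _ => by rw [if_neg h])
  rw [Finset.sum_congr rfl h1, Finset.sum_comm]
  apply Finset.sum_congr rfl
  intro p _
  by_cases hpk : p < pvLen (pvA xs k)
  · -- low bit position: every pair contributes
    have hmax : ∀ j : Nat, p < max (pvLen (pvA xs k)) (pvLen (pvA xs j)) :=
      fun j => lt_of_lt_of_le hpk (le_max_left _ _)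
    have hsplit : ∀ j ∈ Finset.range xs.length,
        (if (k : Int) = (j : Int) then 0
         else if p < max (pvLen (pvA xs k)) (pvLen (pvA xs j)) then
           (if pvBit (pvA xs k) p = pvBit (pvA xs j) p then (1 : Int) else 0) else 0)
        = (if pvBit (pvA xs k) p = pvBit (pvA xs j) p then (1 : Int) else 0)
            - (if j = k then 1 else 0) := by
      intro j _
      by_cases hjk : j = k
      · subst hjk; simp
      · have hne : ¬((k : Int) = (j : Int)) := by
          intro hc; exact hjk (by exact_mod_cast hc.symm)
        rw [if_neg hne, if_pos (hmax j), if_neg hjk, sub_zero]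
    rw [Finset.sum_congr rfl hsplit, Finset.sum_sub_distrib,
      Finset.sum_ite_eq' (Finset.range xs.length) k (fun _ => (1 : Int)),
      if_pos (Finset.mem_range.2 hk)]
    unfold pvE
    rw [if_pos ((hcast p _).2 hpk)]
    rcases pvBit_cases (pvA xs k) p with hb | hb
    · have hs : ∀ j ∈ Finset.range xs.length,
          (if pvBit (pvA xs k) p = pvBit (pvA xs j) p then (1 : Int) else 0)
            = 1 - pvBit (pvA xs j) p := by
        intro j _
        rcases pvBit_cases (pvA xs j) p with h0 | h0 <;> simp [hb, h0]
      rw [Finset.sum_congr rfl hs, Finset.sum_sub_distrib]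
      unfold pvOnes
      rw [hb]
      simp [Finset.sum_const, Finset.card_range]
    · have hs : ∀ j ∈ Finset.range xs.length,
          (if pvBit (pvA xs k) p = pvBit (pvA xs j) p then (1 : Int) else 0)
            = pvBit (pvA xs j) p := by
        intro j _
        rcases pvBit_cases (pvA xs j) p with h0 | h0 <;> simp [hb, h0]
      rw [Finset.sum_congr rfl hs]
      unfold pvOnes
      rw [hb]
      simp
  · -- high bit position: only longer numbers contribute
    have hmaxiff : ∀ j : Nat,
        (p < max (pvLen (pvA xs k)) (pvLen (pvA xs j))) ↔ p < pvLen (pvA xs j) := by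
      intro j
      rw [lt_max_iff]
      constructor
      · rintro (h | h)
        · exact absurd h hpk
        · exact h
      · exact Or.inr
    unfold pvE
    rw [if_neg (fun hc => hpk ((hcast p _).1 hc))]
    rcases pvBit_cases (pvA xs k) p with hb | hb
    · have hterm : ∀ j ∈ Finset.range xs.length,
          (if (k : Int) = (j : Int) then 0
           else if p < max (pvLen (pvA xs k)) (pvLen (pvA xs j)) then
             (if pvBit (pvA xs k) p = pvBit (pvA xs j) p then (1 : Int) else 0) else 0)
          = (if (p : Int) < ((pvLen (pvA xs j) : Nat) : Int) then (1 : Int) else 0)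
              - (if (p : Int) < ((pvLen (pvA xs j) : Nat) : Int) then pvBit (pvA xs j) p else 0) := by
        intro j _
        by_cases hjk : j = k
        · subst hjk
          rw [if_pos rfl, if_neg (fun hc => hpk ((hcast p _).1 hc)),
            if_neg (fun hc => hpk ((hcast p _).1 hc)), sub_self]
        · have hne : ¬((k : Int) = (j : Int)) := by
            intro hc; exact hjk (by exact_mod_cast hc.symm)
          rw [if_neg hne]
          by_cases hpj : p < pvLen (pvA xs j)
          · rw [if_pos ((hmaxiff j).2 hpj), if_pos ((hcast p _).2 hpj),
              if_pos ((hcast p _).2 hpj)]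
            rcases pvBit_cases (pvA xs j) p with h0 | h0 <;> simp [hb, h0]
          · rw [if_neg (fun hc => hpj ((hmaxiff j).1 hc)),
              if_neg (fun hc => hpj ((hcast p _).1 hc)),
              if_neg (fun hc => hpj ((hcast p _).1 hc)), sub_self]
      rw [Finset.sum_congr rfl hterm, Finset.sum_sub_distrib]
      unfold pvLCnt pvLOnes
      rw [hb]
      simp
    · have hterm : ∀ j ∈ Finset.range xs.length,
          (if (k : Int) = (j : Int) then 0
           else if p < max (pvLen (pvA xs k)) (pvLen (pvA xs j)) then
             (if pvBit (pvA xs k) p = pvBit (pvA xs j) p then (1 : Int) else 0) else 0)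
          = (if (p : Int) < ((pvLen (pvA xs j) : Nat) : Int) then pvBit (pvA xs j) p else 0) := by
        intro j _
        by_cases hjk : j = k
        · subst hjk
          rw [if_pos rfl, if_neg (fun hc => hpk ((hcast p _).1 hc))]
        · have hne : ¬((k : Int) = (j : Int)) := by
            intro hc; exact hjk (by exact_mod_cast hc.symm)
          rw [if_neg hne]
          by_cases hpj : p < pvLen (pvA xs j)
          · rw [if_pos ((hmaxiff j).2 hpj), if_pos ((hcast p _).2 hpj)]
            rcases pvBit_cases (pvA xs j) p with h0 | h0 <;> simp [hb, h0]
          · rw [if_neg (fun hc => hpj ((hmaxiff j).1 hc)),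
              if_neg (fun hc => hpj ((hcast p _).1 hc))]
      rw [Finset.sum_congr rfl hterm]
      unfold pvLOnes
      rw [hb]
      simp

-- A's totals dict lookup at a live index
theorem A_key (xs : List Int) (k : Nat) (hk : k < xs.length) :
    (pvDictA xs).getD ((k : Int)) 0
      = ∑ j ∈ Finset.range xs.length,
          (if (k : Int) = (j : Int) then 0
           else
            ∑ p ∈ Finset.range (max (pvLen (pvA xs k)) (pvLen (pvA xs j))),
              (if pvBit (pvA xs k) p = pvBit (pvA xs j) p then (1 : Int) else 0)) := by
  unfold pvDictA
  rw [outer_getD, filter_enumerate xs k hk]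
  simp only [List.map_cons, List.map_nil, List.sum_cons, List.sum_nil,
    PySem.Dict.getD_empty, zero_add, add_zero]
  rw [sum_filter_enum xs (k : Int) (fun q => count_common xs[k] q.2)]
  apply Finset.sum_congr rfl
  intro j _
  by_cases h : (k : Int) = (j : Int)
  · rw [if_pos h, if_pos h]
  · rw [if_neg h, if_neg h, count_common_eq_sum]
    rw [pvA_eq xs k hk]
    rfl

-- B's width bounds
theorem width_nonneg (xs : List Int) : 0 ≤ pvWidthI xs := by
  unfold pvWidthI PySem.List.maxD
  cases hm : PySem.List.max? (pvLengthsL xs) (fun l => l) with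
  | none => simp
  | some m =>
    have hmem : m ∈ pvLengthsL xs := PySem.List.max?_mem hm
    simp only [Option.getD_some]
    unfold pvLengthsL at hmem
    rcases List.mem_map.1 hmem with ⟨x, _, rfl⟩
    positivity

theorem width_isMax (xs : List Int) :
    ∀ j ∈ Finset.range xs.length, ((pvLen (pvA xs j) : Nat) : Int) ≤ pvWidthI xs := by
  intro j hj
  have hj' : j < xs.length := Finset.mem_range.1 hj
  have hmem : ((pvLen (pvA xs j) : Nat) : Int) ∈ pvLengthsL xs := by
    unfold pvLengthsL
    apply List.mem_map.2
    refine ⟨xs[j], List.getElem_mem hj', ?_⟩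
    rw [pvA_eq xs j hj']
    unfold pvLen
    rfl
  unfold pvWidthI PySem.List.maxD
  cases hm : PySem.List.max? (pvLengthsL xs) (fun l => l) with
  | none =>
    rw [PySem.List.max?_eq_none_iff] at hm
    rw [hm] at hmem
    simp at hmem
  | some m =>
    simp only [Option.getD_some]
    exact PySem.List.max?_isMax hm _ hmem

theorem width_bound (xs : List Int) :
    ∀ j ∈ Finset.range xs.length, pvLen (pvA xs j) ≤ pvW xs := by
  intro j hj
  have h1 := width_isMax xs j hj
  have h2 := width_nonneg xs
  unfold pvW
  omega

-- B's totals list lookup at a live index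
theorem zip_lengths (xs : List Int) :
    xs.zip (pvLengthsL xs) = xs.map (fun x => (x, ((PySem.Int.bitLength x : Nat) : Int))) := by
  unfold pvLengthsL
  induction xs with
  | nil => rfl
  | cons x t ih => simpa using ih

theorem B_key (xs : List Int) (k : Nat) (hk : k < xs.length) :
    PySem.List.pyGetD (pvTotalsB xs) ((k : Int)) 0 = ∑ p ∈ Finset.range (pvW xs), pvE xs k p := by
  have hzip := zip_lengths xs
  have hwidth : pvWidthI xs = ((pvW xs : Nat) : Int) := (Int.toNat_of_nonneg (width_nonneg xs)).symm
  unfold pvTotalsB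
  rw [hzip, List.map_map]
  rw [PySem.List.pyGetD_eq_getElem _ 0 (Int.natCast_nonneg k)
    (by simp only [List.length_map]; exact_mod_cast hk)]
  simp only [Int.toNat_natCast, List.getElem_map, Function.comp_apply]
  rw [hwidth, PySem.List.pyRange_one, PySem.List.foldl_add, List.map_map, zero_add]
  have hT2 : ((((pvW xs) : Nat) : Int) - 0).toNat = pvW xs := by simp
  rw [hT2, sum_list_range]
  apply Finset.sum_congr rfl
  intro p hp
  have hp' : p < pvW xs := Finset.mem_range.1 hp
  have hones : PySem.List.pyGetD (pvOnesL xs) ((p : Nat) : Int) 0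
      = List.foldl (fun acc (x : Int) => acc + PySem.Int.band (x >>> p) 1) 0 xs := by
    unfold pvOnesL
    rw [hwidth, PySem.List.pyGetD_map_pyRange _ (pvW xs) p 0 hp']
    simp
  have hlones : PySem.List.pyGetD (pvLOnesL xs) ((p : Nat) : Int) 0
      = List.foldl
          (fun acc (xl : Int × Int) =>
            if xl.2 > ((p : Nat) : Int) then acc + PySem.Int.band (xl.1 >>> p) 1 else acc)
          0 (xs.zip (pvLengthsL xs)) := by
    unfold pvLOnesL
    rw [hwidth, PySem.List.pyGetD_map_pyRange _ (pvW xs) p 0 hp']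
    simp
  have hlcnt : PySem.List.pyGetD (pvLCntL xs) ((p : Nat) : Int) 0
      = List.foldl (fun acc l => if l > ((p : Nat) : Int) then acc + 1 else acc) 0 (pvLengthsL xs) := by
    unfold pvLCntL
    rw [hwidth, PySem.List.pyGetD_map_pyRange _ (pvW xs) p 0 hp']
  have hones' : List.foldl (fun acc (x : Int) => acc + PySem.Int.band (x >>> p) 1) 0 xs = pvOnes xs p := by
    rw [PySem.List.foldl_add, zero_add, map_sum_eq_range_sum]
    unfold pvOnes pvBit pvA
    rfl
  have hlones' : List.foldl
        (fun acc (xl : Int × Int) =>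
          if xl.2 > ((p : Nat) : Int) then acc + PySem.Int.band (xl.1 >>> p) 1 else acc)
        0 (xs.zip (pvLengthsL xs)) = pvLOnes xs p := by
    rw [hzip, List.foldl_map, foldl_add_ite, zero_add, map_sum_eq_range_sum]
    unfold pvLOnes pvBit pvA pvLen
    apply Finset.sum_congr rfl
    intro j _
    rfl
  have hlcnt' : List.foldl (fun acc l => if l > ((p : Nat) : Int) then acc + 1 else acc)
        0 (pvLengthsL xs) = pvLCnt xs p := by
    unfold pvLengthsL
    rw [List.foldl_map, foldl_add_ite, zero_add, map_sum_eq_range_sum]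
    unfold pvLCnt pvA pvLen
    apply Finset.sum_congr rfl
    intro j _
    rfl
  simp only [Function.comp_apply, zero_add, Int.toNat_natCast]
  rw [hones, hlones, hlcnt, hones', hlones', hlcnt']
  unfold pvE pvLen pvBit
  rw [pvA_eq xs k hk]
  simp only [PySem.List.len_eq]
  split_ifs <;> rfl

theorem keys_eq (xs : List Int) (k : Nat) (hk : k < xs.length) :
    (pvDictA xs).getD ((k : Int)) 0 = PySem.List.pyGetD (pvTotalsB xs) ((k : Int)) 0 := by
  rw [A_key xs k hk, B_key xs k hk]
  exact core_identity xs k hk (pvW xs) (width_bound xs)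

-- ===== VERDICT (by name: the statement is the Claim_ definition above) =====
theorem solve_spec : Claim_equal_solve := by
  intro xs _h
  unfold Spec_solve
  simp only [solve, solve_alt]
  apply congrArg
  apply sorted_rev_congr
  intro pair hp
  rcases (PySem.List.mem_enumerate_iff _ _ _).1 hp with ⟨k, hk, rfl⟩
  simp only [zero_add]
  exact keys_eq xs k hk
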